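-- pv_equiv track=rewrite | github.com/seokhoonlee/linguist287 | evaluator.py | micro_average
-- ===== SOURCE A (Python) =====
-- def micro_average(cm, cats):
--     tp = sum([cm[key][key] for key in cats])
--     fp = sum([cm[key1][key2] for key1 in cats for key2 in cats if key1 != key2])
--     fn = fp
--     tn =  (2 * tp) + fn
--     cm_micro = {
--         True:  {True: tp, False: fn},
--         False: {True: fp, False: tn} }
--     return cm_micro
-- ===== SOURCE B (Python) =====
-- def micro_average(cm, cats):
--     catset = set(cats)
--     tp = 0
--     total = 0
--     for c in cats:
--         row = cm[c]
--         tp += row[c]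
--         for key, value in row.items():
--             if key in catset:
--                 total += value
--     fp = total - tp
--     return {
--         True:  {True: tp, False: fp},
--         False: {True: fp, False: 2 * tp + fp}}
-- ===== Notes on version B (the rewrite author's own statement) =====
-- stated objective: alternative
-- what changed: B makes one pass over the selected rows' stored entries: it builds a set of the categories once and, for each category's row, adds every stored entry whose key is in that set, then gets the off-diagonal count as total minus diagonal; A instead runs a conditional nested scan over all category pairs with a dict lookup per pair. Pre_ excludes cats lists that repeat a category while naming more than one, on which A's pair scan double-counts entries and neither behaviour is specified.
import Mathlib
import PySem

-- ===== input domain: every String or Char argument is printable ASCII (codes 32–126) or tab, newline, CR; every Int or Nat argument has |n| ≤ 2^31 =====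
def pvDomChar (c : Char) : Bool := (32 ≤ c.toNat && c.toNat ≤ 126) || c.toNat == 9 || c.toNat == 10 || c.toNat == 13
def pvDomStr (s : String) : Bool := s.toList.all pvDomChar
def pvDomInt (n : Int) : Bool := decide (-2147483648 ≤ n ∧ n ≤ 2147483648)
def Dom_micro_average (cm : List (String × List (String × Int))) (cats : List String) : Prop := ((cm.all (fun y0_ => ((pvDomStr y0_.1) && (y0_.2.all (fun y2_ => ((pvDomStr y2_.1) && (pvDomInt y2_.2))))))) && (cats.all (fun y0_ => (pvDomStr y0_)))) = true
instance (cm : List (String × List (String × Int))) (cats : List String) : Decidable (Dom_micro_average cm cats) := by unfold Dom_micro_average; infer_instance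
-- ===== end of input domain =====

-- B builds a set of the categories once and sums each selected row's STORED entries whose key
-- is in that set (one pass over the data), obtaining the off-diagonal count as total minus
-- diagonal, instead of A's conditional nested scan over all category pairs with a lookup per pair.

-- cm[k1][k2]: first-match association-list lookup, default 0 (Pre_ guarantees both
-- lookups succeed inside the claim, so the default is never used there)
def pvEnt (cm : List (String × List (String × Int))) (k1 k2 : String) : Int :=
  (PySem.Dict.getD (PySem.Dict.mk ((PySem.Dict.getD (PySem.Dict.mk cm) k1 []))) k2 0)

-- ===== PORT A =====
def micro_average (cm : List (String × List (String × Int))) (cats : List String) : List (Bool × List (Bool × Int)) :=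
  let tp := (cats.map (fun key => pvEnt cm key key)).sum
  let fp := ((cats.flatMap (fun k1 => (cats.filter (fun k2 => k1 != k2)).map (fun k2 => pvEnt cm k1 k2)))).sum
  let fn := fp
  let tn := 2 * tp + fn
  [(true, [(true, tp), (false, fn)]), (false, [(true, fp), (false, tn)])]

-- ===== PORT B =====
def micro_average_alt (cm : List (String × List (String × Int))) (cats : List String) : List (Bool × List (Bool × Int)) :=
  let catset := PySem.Set.ofList cats
  let acc := cats.foldl
    (fun (acc : Int × Int) c =>
      let row := PySem.Dict.getD (PySem.Dict.mk cm) c []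
      (acc.1 + PySem.Dict.getD (PySem.Dict.mk row) c 0,
       row.foldl (fun t p => if p.1 ∈ catset then t + p.2 else t) acc.2))
    ((0 : Int), (0 : Int))
  let tp := acc.1
  let fp := acc.2 - tp
  [(true, [(true, tp), (false, fp)]), (false, [(true, fp), (false, 2 * tp + fp)])]

-- ===== PRECONDITION & SPEC =====
-- Pre_ excludes (a) the inputs on which A raises KeyError (a category missing from cm or from a
-- selected row), (b) cats lists that repeat a category while naming more than one, on which A's
-- pair scan double-counts entries and neither behaviour is specified (lists naming a single
-- category are kept: there A and B provably agree even with repetitions), and (c) association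
-- lists whose selected rows repeat a key, which do not represent a Python dict (a dict cannot
-- hold duplicate keys), so nothing from A's Python domain is excluded by (c).
def Pre_micro_average (cm : List (String × List (String × Int))) (cats : List String) : Prop :=
  (cats.Nodup ∨ ∀ x ∈ cats, ∀ y ∈ cats, x = y) ∧ (∀ k ∈ cats, ((((PySem.Dict.mk cm).getD k []).map Prod.fst)).Nodup) ∧
  ∀ k1 ∈ cats, ((PySem.Dict.mk cm).get? k1).isSome ∧
    ∀ k2 ∈ cats, ((PySem.Dict.mk ((PySem.Dict.mk cm).getD k1 [])).get? k2).isSome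
instance (cm : List (String × List (String × Int))) (cats : List String) : Decidable (Pre_micro_average cm cats) := by unfold Pre_micro_average; infer_instance

def pvWitness_micro_average : (List (String × List (String × Int))) × List String :=
  ([("a", [("a", 3), ("b", 1)]), ("b", [("a", 0), ("b", 2)])], ["a", "b"])

def Spec_micro_average (cm : List (String × List (String × Int))) (cats : List String) (out : List (Bool × List (Bool × Int))) : Prop := out = micro_average_alt cm cats
instance (cm : List (String × List (String × Int))) (cats : List String) (out : List (Bool × List (Bool × Int))) : Decidable (Spec_micro_average cm cats out) := by unfold Spec_micro_average; infer_instance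

-- ===== CLAIM (what is proved, stated in full; the proofs are below) =====
def Claim_equal_micro_average : Prop := ∀ (cm : List (String × List (String × Int))) (cats : List String), Dom_micro_average cm cats → Pre_micro_average cm cats → Spec_micro_average cm cats (micro_average cm cats)

-- ===== LEMMAS AND PROOFS =====

-- a guarded accumulating fold over stored entries is the sum of the values its filter keeps
lemma foldl_if_add (cats : List String) (l : List (String × Int)) (t0 : Int) :
    l.foldl (fun t p => if p.1 ∈ PySem.Set.ofList cats then t + p.2 else t) t0
      = t0 + ((l.filter (fun p => p.1 ∈ cats)).map (·.2)).sum := by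
  induction l generalizing t0 with
  | nil => simp
  | cons a t ih =>
    by_cases h : a.1 ∈ cats
    · have h' : a.1 ∈ PySem.Set.ofList cats := (PySem.Set.mem_ofList _ _).mpr h
      simp only [List.foldl_cons, if_pos h', ih, List.filter_cons, decide_eq_true h,
        ite_true, List.map_cons, List.sum_cons]
      ring
    · have h' : a.1 ∉ PySem.Set.ofList cats := fun hh => h ((PySem.Set.mem_ofList _ _).mp hh)
      rw [List.foldl_cons, if_neg h', ih]
      simp [List.filter_cons, decide_eq_false h]

-- a key absent from the key column looks up to none
lemma get?_mk_of_not_mem (l : List (String × Int)) (k : String) (h : k ∉ l.map Prod.fst) :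
    (PySem.Dict.mk l).get? k = none := by
  induction l with
  | nil => simp [PySem.Dict.get?]
  | cons a t ih =>
    simp only [List.map_cons, List.mem_cons, not_or] at h
    rw [PySem.Dict.get?_mk_cons]
    have hne : (a.1 == k) = false := by
      simp only [beq_eq_false_iff_ne, ne_eq]
      exact fun hh => h.1 hh.symm
    rw [hne]
    simpa using ih h.2
lemma getD_mk_of_not_mem (l : List (String × Int)) (k : String) (h : k ∉ l.map Prod.fst) :
    (PySem.Dict.mk l).getD k 0 = 0 := by
  rw [PySem.Dict.getD_eq_get?_getD, get?_mk_of_not_mem l k h]; rfl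

-- summing a pointwise-overridden lookup over a duplicate-free key list
lemma sum_map_ite (cats : List String) (hnd : cats.Nodup) (k : String) (v : Int) (g : String → Int) :
    (cats.map (fun c => if k = c then v else g c)).sum
      = (if k ∈ cats then v - g k else 0) + (cats.map g).sum := by
  induction cats with
  | nil => simp
  | cons a t ih =>
    rcases List.nodup_cons.mp hnd with ⟨ha, ht⟩
    by_cases h : k = a
    · subst h
      simp [ih ht, if_neg ha]
      ring
    · simp only [List.map_cons, List.sum_cons, if_neg h, List.mem_cons, ih ht]
      by_cases hm : k ∈ t
      · simp [hm, h]; ring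
      · simp [hm, h]

-- one row: the membership-filtered sum of stored entries equals the sum of lookups over cats
lemma row_filter_sum (row : List (String × Int)) (cats : List String)
    (hrow : (row.map Prod.fst).Nodup) (hnd : cats.Nodup) :
    ((row.filter (fun p => p.1 ∈ cats)).map (·.2)).sum
      = (cats.map (fun c => (PySem.Dict.mk row).getD c 0)).sum := by
  induction row with
  | nil => simp [PySem.Dict.getD, PySem.Dict.get?]
  | cons a rest ih =>
    rcases List.nodup_cons.mp hrow with ⟨ha, hrest⟩
    have hlk : ∀ c, (PySem.Dict.mk (a :: rest)).getD c 0
        = if a.1 = c then a.2 else (PySem.Dict.mk rest).getD c 0 := by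
      intro c
      rw [PySem.Dict.getD_eq_get?_getD, PySem.Dict.get?_mk_cons]
      by_cases h : a.1 = c
      · simp [h]
      · simp [h, PySem.Dict.getD_eq_get?_getD]
    have hmap : (cats.map (fun c => (PySem.Dict.mk (a :: rest)).getD c 0)).sum
        = (cats.map (fun c => if a.1 = c then a.2 else (PySem.Dict.mk rest).getD c 0)).sum := by
      rw [List.map_congr_left (fun c _ => hlk c)]
    rw [hmap, sum_map_ite cats hnd a.1 a.2 _, getD_mk_of_not_mem rest a.1 ha, ← ih hrest]
    by_cases h : a.1 ∈ cats
    · simp [h]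
    · simp [h]

-- one scan line of A: the value-filtered sum is the full sum minus count(k1) diagonal copies
lemma sum_filter_ne (e : String → Int) (l : List String) (k1 : String) :
    ((l.filter (fun k2 => k1 != k2)).map e).sum
      = (l.map e).sum - (l.count k1 : Int) * e k1 := by
  induction l with
  | nil => simp
  | cons a t ih =>
    by_cases h : k1 = a
    · subst h
      have hb : (k1 != k1) = false := by simp
      simp only [List.filter, hb, List.map_cons, List.sum_cons, List.count_cons_self, ih]
      push_cast
      ring
    · have hb : (k1 != a) = true := by simp [bne_iff_ne]; exact h
      have hc : (a :: t).count k1 = t.count k1 := by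
        have hne : a ≠ k1 := fun hh => h hh.symm
        simp [hne]
      simp only [List.filter, hb, List.map_cons, List.sum_cons, hc, ih]
      ring

-- A's off-diagonal sum over a duplicate-free cats = full pair sum − diagonal sum
lemma offdiag_eq_total_sub_diag (e : String → String → Int) (cats : List String) (hnd : cats.Nodup) :
    (cats.flatMap (fun k1 => (cats.filter (fun k2 => k1 != k2)).map (fun k2 => e k1 k2))).sum
      = (cats.map (fun k1 => (cats.map (fun k2 => e k1 k2)).sum)).sum
        - (cats.map (fun k => e k k)).sum := by
  have h : ∀ l : List String, (∀ x ∈ l, x ∈ cats) →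
      (l.flatMap (fun k1 => (cats.filter (fun k2 => k1 != k2)).map (fun k2 => e k1 k2))).sum
        = (l.map (fun k1 => (cats.map (fun k2 => e k1 k2)).sum)).sum - (l.map (fun k => e k k)).sum := by
    intro l
    induction l with
    | nil => simp
    | cons a t ih =>
      intro hmem
      have hcnt : cats.count a = 1 := List.count_eq_one_of_mem hnd (hmem a (by simp))
      simp only [List.flatMap_cons, List.sum_append, List.map_cons, List.sum_cons,
        sum_filter_ne (fun k2 => e a k2) cats a, hcnt,
        ih (fun x hx => hmem x (List.mem_cons_of_mem _ hx))]
      push_cast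
      ring
  exact h cats (fun x hx => hx)

-- B's pair fold accumulates the diagonal sum and the filtered per-row totals
lemma foldl_pair (cm : List (String × List (String × Int))) (cats l : List String) (a b : Int) :
    l.foldl
      (fun (acc : Int × Int) c =>
        let row := PySem.Dict.getD (PySem.Dict.mk cm) c []
        (acc.1 + PySem.Dict.getD (PySem.Dict.mk row) c 0,
         row.foldl (fun t p => if p.1 ∈ PySem.Set.ofList cats then t + p.2 else t) acc.2))
      (a, b)
    = (a + (l.map (fun c => pvEnt cm c c)).sum,
       b + (l.map (fun c =>
             ((((PySem.Dict.mk cm).getD c []).filter (fun p => p.1 ∈ cats)).map (·.2)).sum)).sum) := by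
  induction l generalizing a b with
  | nil => simp
  | cons c t ih =>
    simp only [List.foldl_cons, List.map_cons, List.sum_cons, ih,
      foldl_if_add cats ((PySem.Dict.mk cm).getD c []) b]
    simp only [Prod.mk.injEq]
    constructor
    · show a + pvEnt cm c c + _ = _
      ring
    · ring

-- a duplicate-free row: the key-filtered sum of stored entries is the single lookup
lemma filter_key_sum (row : List (String × Int)) (c : String)
    (hrow : (row.map Prod.fst).Nodup) :
    ((row.filter (fun p => p.1 = c)).map (·.2)).sum = (PySem.Dict.mk row).getD c 0 := by
  induction row with
  | nil => simp [PySem.Dict.getD, PySem.Dict.get?]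
  | cons a rest ih =>
    rcases List.nodup_cons.mp hrow with ⟨ha, hrest⟩
    have hlk : (PySem.Dict.mk (a :: rest)).getD c 0
        = if a.1 = c then a.2 else (PySem.Dict.mk rest).getD c 0 := by
      rw [PySem.Dict.getD_eq_get?_getD, PySem.Dict.get?_mk_cons]
      by_cases h : a.1 = c
      · simp [h]
      · simp [h, PySem.Dict.getD_eq_get?_getD]
    rw [hlk]
    by_cases h : a.1 = c
    · have hnil : rest.filter (fun p => p.1 = c) = [] := by
        rw [List.filter_eq_nil_iff]
        intro p hp
        simp only [decide_eq_true_eq]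
        intro hc
        exact ha (List.mem_map.mpr ⟨p, hp, hc.trans h.symm⟩)
      simp [List.filter_cons, h, hnil]
    · simp [List.filter_cons, h, ih hrest]

theorem micro_average_spec : Claim_equal_micro_average := by
  intro cm cats _ hpre
  rcases hpre with ⟨hcase, hrows, _⟩
  unfold Spec_micro_average micro_average micro_average_alt
  simp only []
  rw [foldl_pair cm cats cats 0 0]
  rcases hcase with hnd | hconst
  · have hrow : ∀ c ∈ cats,
        ((((PySem.Dict.mk cm).getD c []).filter (fun p => p.1 ∈ cats)).map (·.2)).sum
          = (cats.map (fun k2 => pvEnt cm c k2)).sum := by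
      intro c hc
      exact row_filter_sum _ cats (hrows c hc) hnd
    rw [List.map_congr_left hrow]
    rw [offdiag_eq_total_sub_diag (pvEnt cm) cats hnd]
    simp only [zero_add]
  · -- cats names a single category (possibly repeated): both off-diagonal counts are zero
    have hfp : (cats.flatMap (fun k1 => (cats.filter (fun k2 => k1 != k2)).map (fun k2 => pvEnt cm k1 k2))).sum = 0 := by
      have : ∀ k1 ∈ cats, cats.filter (fun k2 => k1 != k2) = [] := by
        intro k1 h1
        rw [List.filter_eq_nil_iff]
        intro y hy
        simp [hconst y hy k1 h1]
      have hnil : cats.flatMap (fun k1 => (cats.filter (fun k2 => k1 != k2)).map (fun k2 => pvEnt cm k1 k2)) = [] := by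
        rw [List.flatMap_eq_nil_iff]
        intro k1 h1
        rw [this k1 h1]
        rfl
      rw [hnil]
      rfl
    have hrow : ∀ c ∈ cats,
        ((((PySem.Dict.mk cm).getD c []).filter (fun p => p.1 ∈ cats)).map (·.2)).sum
          = pvEnt cm c c := by
      intro c hc
      have hcg : ((PySem.Dict.mk cm).getD c []).filter (fun p => p.1 ∈ cats)
          = ((PySem.Dict.mk cm).getD c []).filter (fun p => p.1 = c) := by
        apply List.filter_congr
        intro p _
        have : (p.1 ∈ cats) ↔ (p.1 = c) := ⟨fun h => hconst p.1 h c hc, fun h => h ▸ hc⟩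
        simp [this]
      rw [hcg, filter_key_sum _ c (hrows c hc)]
      rfl
    rw [List.map_congr_left hrow, hfp]
    simp only [zero_add, sub_self]
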